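-- pv_equiv track=rewrite | github.com/geniusbat/smcs-implementation | newUtilities.py | invEn2
-- ===== SOURCE A (Python) =====
-- import string
--
-- def xorDecrypt(c:int,k:int):
--     return c ^ k
--
-- def adderDecrypt(c:int,k:int):
--     if c >= k:
--         return c - k
--     else:
--         lkC = [1 if i == 0 else 0 for i in bitArray(k)]
--         kC = 0
--         lkC.reverse()
--         for i in range(len(lkC)):
--             bit = lkC[i]
--             if bit == 1:
--                 kC += 2**i
--         sum = c + kC + 1
--         return sum
--
-- def invEn2(a:int,b:int,cstr:string):
--     cl = [ord(i) for i in list(cstr)]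
--     for i in range(len(cl)):
--         cl[i] = xorDecrypt(adderDecrypt(cl[i],b),a) % 256
--     s=""
--     for i in cl:
--         s += chr(i)
--     return s
--
-- def bitArray(n):
--     return [1 if digit=='1' else 0 for digit in bin(n)[2:]]
-- ===== SOURCE B (Python) =====
-- def invEn2(a: int, b: int, cstr: str):
--     return ''.join(
--         chr((((o - b) if o >= b else o + (1 << b.bit_length()) - b) ^ a) % 256)
--         for o in map(ord, cstr)
--     )
-- ===== Notes on version B (the rewrite author's own statement) =====
-- stated objective: faster
-- what changed: adderDecrypt's bitArray/reverse/power-of-two loop is replaced by the closed form c + (1 << b.bit_length()) - b, xorDecrypt and adderDecrypt are inlined, and the string is built with a single ''.join over the characters instead of an index loop mutating a list plus a second += concatenation loop.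
import Mathlib
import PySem

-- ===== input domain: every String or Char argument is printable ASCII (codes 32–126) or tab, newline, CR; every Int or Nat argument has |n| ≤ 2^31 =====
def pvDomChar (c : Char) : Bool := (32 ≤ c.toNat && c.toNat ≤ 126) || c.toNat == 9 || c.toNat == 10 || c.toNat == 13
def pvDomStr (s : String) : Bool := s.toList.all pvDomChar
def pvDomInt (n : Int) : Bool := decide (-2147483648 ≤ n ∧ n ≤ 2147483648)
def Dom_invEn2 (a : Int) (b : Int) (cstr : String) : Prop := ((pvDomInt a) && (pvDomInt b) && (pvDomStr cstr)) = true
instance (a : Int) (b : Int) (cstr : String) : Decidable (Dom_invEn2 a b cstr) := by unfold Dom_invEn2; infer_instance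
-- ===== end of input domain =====

-- B replaces A's per-character bit-array complement loop by the closed form
-- c + 2^bit_length(b) - b and builds the string in one join pass (objective: faster,
-- measured).

-- ===== PORT A =====
-- bin(n)[2:] mapped to 1/0 ints
def pvBitArray (n : Int) : List Int :=
  ((PySem.Int.toBinChars0b n).drop 2).map (fun digit => if digit = '1' then (1 : Int) else 0)

def pvXorDecrypt (c k : Int) : Int := PySem.Int.bxor c k

def pvAdderDecrypt (c k : Int) : Int :=
  if c ≥ k then c - k
  else
    let lkC := (pvBitArray k).map (fun i => if i = 0 then (1 : Int) else 0)
    let lkC := lkC.reverse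
    let kC := (List.range lkC.length).foldl
      (fun kC i => if lkC.getD i 0 = 1 then kC + 2 ^ i else kC) 0
    c + kC + 1

def invEn2 (a : Int) (b : Int) (cstr : String) : String :=
  let cl : List Int := cstr.toList.map (fun i => (i.toNat : Int))
  let cl := (List.range cl.length).foldl
    (fun cl i => cl.set i (PySem.Int.mod (pvXorDecrypt (pvAdderDecrypt (cl.getD i 0) b) a) 256)) cl
  cl.foldl (fun s i => s.push (Char.ofNat i.toNat)) ""

-- ===== PORT B =====
def invEn2_alt (a : Int) (b : Int) (cstr : String) : String :=
  String.ofList (cstr.toList.map (fun ch =>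
    let o : Int := ch.toNat
    let d : Int := if o ≥ b then o - b else o + 2 ^ PySem.Int.bitLength b - b
    Char.ofNat (PySem.Int.mod (PySem.Int.bxor d a) 256).toNat))

-- ===== PRECONDITION & SPEC =====
def Spec_invEn2 (a : Int) (b : Int) (cstr : String) (out : String) : Prop := out = invEn2_alt a b cstr
instance (a : Int) (b : Int) (cstr : String) (out : String) : Decidable (Spec_invEn2 a b cstr out) := by unfold Spec_invEn2; infer_instance

-- ===== CLAIM (what is proved, stated in full; the proofs are below) =====
def Claim_equal_invEn2 : Prop := ∀ (a : Int) (b : Int) (cstr : String), Dom_invEn2 a b cstr → Spec_invEn2 a b cstr (invEn2 a b cstr)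

-- ===== LEMMAS AND PROOFS =====

-- big-endian 0/1 digits of a natural number
def pvBitsOf (n : Nat) : List Int :=
  if _h : n < 2 then [(n : Int)] else pvBitsOf (n / 2) ++ [((n % 2 : Nat) : Int)]
decreasing_by exact Nat.div_lt_self (by omega) (by omega)

def pvCharsOf (n : Nat) : List Char :=
  if _h : n < 2 then [Nat.digitChar n] else pvCharsOf (n / 2) ++ [Nat.digitChar (n % 2)]
decreasing_by exact Nat.div_lt_self (by omega) (by omega)

def pvValBE (bs : List Int) : Int := bs.foldl (fun v b => 2 * v + b) 0

theorem pv_core_eq : ∀ (f n : Nat) (ds : List Char), n < f →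
    Nat.toDigitsCore 2 f n ds = pvCharsOf n ++ ds := by
  intro f
  induction f with
  | zero => intro n ds h; omega
  | succ f ih =>
    intro n ds h
    rw [Nat.toDigitsCore]
    by_cases h2 : n / 2 = 0
    · have hn : n < 2 := by omega
      simp only [h2, if_pos]
      conv_rhs => rw [pvCharsOf, dif_pos hn]
      have : n % 2 = n := Nat.mod_eq_of_lt hn
      simp [this]
    · have hlt : n / 2 < f := by omega
      rw [if_neg h2, ih (n / 2) _ hlt]
      conv_rhs => rw [pvCharsOf, dif_neg (by omega)]
      simp

theorem pv_map_chars (n : Nat) :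
    (pvCharsOf n).map (fun digit => if digit = '1' then (1 : Int) else 0) = pvBitsOf n := by
  induction n using Nat.strong_induction_on with
  | _ n ih =>
    by_cases h : n < 2
    · rw [pvCharsOf, dif_pos h, pvBitsOf, dif_pos h]
      interval_cases n <;> simp [Nat.digitChar]
    · rw [pvCharsOf, dif_neg h, pvBitsOf, dif_neg h]
      rw [List.map_append, ih (n / 2) (Nat.div_lt_self (by omega) (by omega))]
      have h2 : n % 2 = 0 ∨ n % 2 = 1 := by omega
      rcases h2 with h2 | h2 <;> simp [h2, Nat.digitChar]

theorem pv_bitArray_eq (k : Int) (hk : 0 < k) : pvBitArray k = pvBitsOf k.toNat := by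
  unfold pvBitArray PySem.Int.toBinChars0b
  rw [if_neg (by omega)]
  show (('0' :: 'b' :: Nat.toDigits 2 k.toNat).drop 2).map _ = _
  simp only [List.drop]
  rw [Nat.toDigits, pv_core_eq _ _ _ (Nat.lt_succ_self _), List.append_nil, pv_map_chars]

theorem pv_bits_len (n : Nat) (hn : 0 < n) :
    (pvBitsOf n).length = PySem.Int.bitLength (n : Int) := by
  induction n using Nat.strong_induction_on with
  | _ n ih =>
    by_cases h : n < 2
    · have : n = 1 := by omega
      subst this
      rw [pvBitsOf, dif_pos (by omega)]
      rw [PySem.Int.bitLength_natCast (m := 1) (by omega)]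
      norm_num [PySem.Int.bitLength_zero]
    · rw [pvBitsOf, dif_neg h]
      rw [PySem.Int.bitLength_natCast (m := n) (by omega)]
      rw [List.length_append]
      rw [ih (n / 2) (Nat.div_lt_self (by omega) (by omega)) (by omega)]
      simp

theorem pv_valBE_append (xs : List Int) (x : Int) :
    pvValBE (xs ++ [x]) = 2 * pvValBE xs + x := by
  unfold pvValBE
  rw [List.foldl_append]
  rfl

theorem pv_bits_val (n : Nat) :
    pvValBE (pvBitsOf n) = (n : Int) ∧
    pvValBE ((pvBitsOf n).map (fun i => if i = 0 then (1 : Int) else 0))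
      = 2 ^ (pvBitsOf n).length - 1 - n := by
  induction n using Nat.strong_induction_on with
  | _ n ih =>
    by_cases h : n < 2
    · rw [pvBitsOf, dif_pos h]
      interval_cases n <;> simp [pvValBE]
    · rw [pvBitsOf, dif_neg h]
      obtain ⟨ih1, ih2⟩ := ih (n / 2) (Nat.div_lt_self (by omega) (by omega))
      constructor
      · rw [pv_valBE_append, ih1]
        have := Nat.div_add_mod n 2
        push_cast
        omega
      · have hmod : n % 2 = 0 ∨ n % 2 = 1 := by omega
        have hdm := Nat.div_add_mod n 2
        rcases hmod with hm | hm <;>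
          simp only [List.map_append, List.map_singleton, hm, Nat.cast_zero, Nat.cast_one] <;>
          rw [pv_valBE_append, ih2] <;>
          simp only [List.length_append, List.length_singleton,
            if_neg one_ne_zero] <;>
          · rw [pow_succ]
            have h2 : ((n : Int)) = 2 * ((n / 2 : Nat) : Int) + ((n % 2 : Nat) : Int) := by
              push_cast; omega
            rw [h2, hm]
            push_cast
            ring

theorem pv_foldl_if_sum (L : Nat) (P : Nat → Prop) [DecidablePred P] (g : Nat → Int) :
    (List.range L).foldl (fun acc i => if P i then acc + g i else acc) 0
      = ∑ i ∈ Finset.range L, if P i then g i else 0 := by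
  induction L with
  | zero => simp
  | succ L ih =>
    rw [List.range_succ, List.foldl_append, ih, Finset.sum_range_succ]
    simp only [List.foldl]
    split_ifs <;> simp

theorem pv_sum_getD (cs : List Int) (h : ∀ x ∈ cs, x = 0 ∨ x = 1) :
    (∑ i ∈ Finset.range cs.length, if cs.getD i 0 = 1 then (2 ^ i : Int) else 0)
      = pvValBE cs.reverse := by
  induction cs with
  | nil => simp [pvValBE]
  | cons c cs ih =>
    rw [List.length_cons, Finset.sum_range_succ']
    have hstep : (∑ i ∈ Finset.range cs.length,
        if (c :: cs).getD (i + 1) 0 = 1 then (2 ^ (i + 1) : Int) else 0)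
        = 2 * ∑ i ∈ Finset.range cs.length, if cs.getD i 0 = 1 then (2 ^ i : Int) else 0 := by
      rw [Finset.mul_sum]
      apply Finset.sum_congr rfl
      intro i _
      simp only [List.getD_cons_succ]
      split_ifs <;> ring
    rw [hstep, ih (fun x hx => h x (List.mem_cons_of_mem _ hx))]
    rw [List.reverse_cons, pv_valBE_append]
    simp only [List.getD_cons_zero]
    have hc : c = 0 ∨ c = 1 := h c List.mem_cons_self
    rcases hc with hc | hc <;> simp [hc]

theorem pv_adder_closed (c k : Int) (hc : 0 ≤ c) :
    pvAdderDecrypt c k = if c ≥ k then c - k else c + 2 ^ PySem.Int.bitLength k - k := by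
  by_cases hge : c ≥ k
  · simp [pvAdderDecrypt, hge]
  · have hk : 0 < k := by omega
    rw [pvAdderDecrypt, if_neg hge, if_neg hge]
    have hbits : pvBitArray k = pvBitsOf k.toNat := pv_bitArray_eq k hk
    set lkC := (pvBitArray k).map (fun i => if i = 0 then (1 : Int) else 0) with hlkC
    have hentries : ∀ x ∈ lkC, x = 0 ∨ x = 1 := by
      intro x hx
      rw [hlkC] at hx
      obtain ⟨y, _, hy⟩ := List.mem_map.mp hx
      by_cases h0 : y = 0 <;> simp [h0] at hy <;> omega
    have hfold : (List.range lkC.reverse.length).foldl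
        (fun kC i => if lkC.reverse.getD i 0 = 1 then kC + 2 ^ i else kC) 0
        = pvValBE lkC.reverse.reverse := by
      rw [pv_foldl_if_sum lkC.reverse.length (fun i => lkC.reverse.getD i 0 = 1) (fun i => 2 ^ i)]
      exact pv_sum_getD lkC.reverse (by intro x hx; exact hentries x (List.mem_reverse.mp hx))
    simp only [List.reverse_reverse] at hfold
    show c + (List.range lkC.reverse.length).foldl
        (fun kC i => if lkC.reverse.getD i 0 = 1 then kC + 2 ^ i else kC) 0 + 1
      = c + 2 ^ PySem.Int.bitLength k - k
    rw [hfold, hlkC, hbits]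
    have hval := (pv_bits_val k.toNat).2
    rw [hval]
    have hlen := pv_bits_len k.toNat (by omega)
    have hkk : ((k.toNat : Nat) : Int) = k := Int.toNat_of_nonneg (by omega)
    rw [hkk] at hval hlen ⊢
    rw [hlen]
    ring

theorem pv_set_loop_aux (f : Int → Int) :
    ∀ (rest done : List Int),
      (List.range' done.length rest.length).foldl
        (fun l i => l.set i (f (l.getD i 0))) (done ++ rest) = done ++ rest.map f := by
  intro rest
  induction rest with
  | nil => simp
  | cons x rest ih =>
    intro done
    rw [List.length_cons, List.range'_succ, List.foldl_cons]
    have hget : (done ++ x :: rest).getD done.length 0 = x := by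
      rw [List.getD_eq_getElem?_getD, List.getElem?_append_right (le_refl _)]
      simp
    have hset : (done ++ x :: rest).set done.length (f x) = (done ++ [f x]) ++ rest := by
      rw [List.set_append_right _ _ (le_refl _)]
      simp
    rw [hget, hset]
    have := ih (done ++ [f x])
    simp only [List.length_append, List.length_singleton, List.append_assoc,
      List.singleton_append] at this ⊢
    exact this

theorem pv_set_loop (f : Int → Int) (cl : List Int) :
    (List.range cl.length).foldl (fun l i => l.set i (f (l.getD i 0))) cl = cl.map f := by
  have := pv_set_loop_aux f cl []
  simpa [List.range_eq_range'] using this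

theorem pv_push_fold (g : Int → Char) :
    ∀ (l : List Int) (s : String),
      l.foldl (fun s i => s.push (g i)) s = s ++ String.ofList (l.map g) := by
  intro l
  induction l with
  | nil =>
    intro s
    refine String.toList_inj.mp ?_
    simp
  | cons x l ih =>
    intro s
    rw [List.foldl_cons, ih]
    refine String.toList_inj.mp ?_
    simp

-- ===== VERDICT (by name: the statement is the Claim_ definition above) =====
theorem invEn2_spec : Claim_equal_invEn2 := by
  intro a b cstr _
  unfold Spec_invEn2 invEn2 invEn2_alt
  simp only []
  rw [pv_set_loop (fun c => PySem.Int.mod (pvXorDecrypt (pvAdderDecrypt c b) a) 256)]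
  rw [pv_push_fold]
  rw [List.map_map]
  refine String.toList_inj.mp ?_
  simp only [String.toList_append, String.toList_ofList]
  have : ("" : String).toList = [] := rfl
  rw [this, List.nil_append, List.map_map]
  apply List.map_congr_left
  intro ch _
  simp only [Function.comp]
  rw [pv_adder_closed _ b (by positivity)]
  rfl
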